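-- pv_equiv track=rewrite | github.com/pypi-data/pypi-mirror-367 | packages/boot-code/boot_code-0.1.0.tar.gz/boot_code-0.1.0/boot/parsers/languages/rust.py | _find_errors_with_keywords
-- ===== SOURCE A (Python) =====
-- from typing import List
--
-- def _find_errors_with_keywords(
--     error_chunks: List[str], keywords: List[str]
-- ) -> List[str]:
--     """
--     Filters a list of error chunks to find those containing specific keywords.
--
--     Args:
--         error_chunks: A list of multi-line strings, each an error block.
--         keywords: A list of keywords to search for.
--
--     Returns:
--         A list of error chunks that contain any of the keywords.
--     """
--     found = []
--     for chunk in error_chunks: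
--         if any(keyword in chunk for keyword in keywords):
--             found.append(chunk.strip())
--     return found
-- ===== SOURCE B (Python) =====
-- def _find_errors_with_keywords(error_chunks, keywords):
--     # Loop inversion: process one keyword at a time over the still-unmatched
--     # chunk indices, moving matches into `hit`; finally emit the stripped
--     # chunks in sorted index order.
--     hit = set()
--     remaining = list(range(len(error_chunks)))
--     for keyword in keywords:
--         still = []
--         add = hit.add
--         keep = still.append
--         for i in remaining:
--             if keyword in error_chunks[i]:
--                 add(i)
--             else:
--                 keep(i)
--         remaining = still
--     return [error_chunks[i].strip() for i in sorted(hit)]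
-- ===== Notes on version B (the rewrite author's own statement) =====
-- stated objective: alternative
-- what changed: Inverted the loop nest: B processes one keyword at a time over a shrinking list of still-unmatched chunk indices, collecting matches into a set, and finally emits the stripped chunks in sorted index order, instead of A's per-chunk any-keyword scan with an appended output list.
import Mathlib
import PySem

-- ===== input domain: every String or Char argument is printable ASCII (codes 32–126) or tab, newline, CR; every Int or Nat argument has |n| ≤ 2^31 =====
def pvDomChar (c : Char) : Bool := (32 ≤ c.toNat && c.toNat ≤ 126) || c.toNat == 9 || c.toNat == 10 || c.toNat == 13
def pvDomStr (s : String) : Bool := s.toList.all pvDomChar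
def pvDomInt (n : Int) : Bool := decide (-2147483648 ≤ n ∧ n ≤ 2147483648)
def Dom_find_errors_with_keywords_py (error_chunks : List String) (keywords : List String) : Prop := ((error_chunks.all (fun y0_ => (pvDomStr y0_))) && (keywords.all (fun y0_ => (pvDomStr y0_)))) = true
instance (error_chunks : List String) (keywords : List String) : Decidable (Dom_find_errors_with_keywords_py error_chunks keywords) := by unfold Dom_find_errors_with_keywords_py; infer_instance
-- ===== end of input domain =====

-- B inverts the loop nest (per-keyword scan into a set of matching chunk indices,
-- then emit stripped chunks in sorted index order); alternative structure, no speed claim.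

-- ===== PORT A =====
def find_errors_with_keywords_py (error_chunks : List String) (keywords : List String) : List String :=
  error_chunks.foldl (fun found chunk =>
    if keywords.any (fun keyword => PySem.Str.isIn keyword chunk) then
      found ++ [PySem.Str.strip chunk]
    else found) []

-- ===== PORT B =====
def find_errors_with_keywords_py_alt (error_chunks : List String) (keywords : List String) : List String :=
  let st : PySem.Set Int × List Int :=
    keywords.foldl (fun st keyword =>
      let inner : PySem.Set Int × List Int :=
        st.2.foldl (fun hs i =>
          if PySem.Str.isIn keyword (PySem.List.pyGetD error_chunks i "") then
            (PySem.Set.add hs.1 i, hs.2)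
          else (hs.1, hs.2 ++ [i])) (st.1, [])
      inner)
      (PySem.Set.empty, PySem.List.pyRange 0 (PySem.List.len error_chunks) 1)
  (PySem.List.sorted st.1 (fun i => i) false).map
    (fun i => PySem.Str.strip (PySem.List.pyGetD error_chunks i ""))

-- ===== PRECONDITION & SPEC =====
def Spec_find_errors_with_keywords_py (error_chunks : List String) (keywords : List String) (out : List String) : Prop := out = find_errors_with_keywords_py_alt error_chunks keywords
instance (error_chunks : List String) (keywords : List String) (out : List String) : Decidable (Spec_find_errors_with_keywords_py error_chunks keywords out) := by unfold Spec_find_errors_with_keywords_py; infer_instance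

-- ===== CLAIM (what is proved, stated in full; the proofs are below) =====
def Claim_equal_find_errors_with_keywords_py : Prop := ∀ (error_chunks : List String) (keywords : List String), Dom_find_errors_with_keywords_py error_chunks keywords → Spec_find_errors_with_keywords_py error_chunks keywords (find_errors_with_keywords_py error_chunks keywords)

-- ===== LEMMAS AND PROOFS =====

-- one keyword pass over the remaining indices: hits are added to the set, misses kept in order
theorem inner_fold_eq (ec : List String) (kw : String) (rem : List Int)
    (h : PySem.Set Int) (acc : List Int) :
    rem.foldl (fun hs i =>
        if PySem.Str.isIn kw (PySem.List.pyGetD ec i "") then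
          (PySem.Set.add hs.1 i, hs.2)
        else (hs.1, hs.2 ++ [i])) (h, acc)
      = (PySem.Set.update h (rem.filter (fun i => PySem.Str.isIn kw (PySem.List.pyGetD ec i ""))),
         acc ++ rem.filter (fun i => !(PySem.Str.isIn kw (PySem.List.pyGetD ec i "")))) := by
  induction rem generalizing h acc with
  | nil => simp [PySem.Set.update_nil]
  | cons i t ih =>
    simp only [List.foldl_cons]
    by_cases hc : PySem.Str.isIn kw (PySem.List.pyGetD ec i "") = true
    · rw [if_pos hc, ih, List.filter_cons, List.filter_cons, if_pos hc, PySem.Set.update_cons,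
        if_neg (by simpa using hc)]
    · rw [if_neg hc, ih, List.filter_cons, List.filter_cons, if_neg hc,
        if_pos (by simpa using hc)]
      simp

-- membership in the final hit set of the outer fold
theorem mem_outer_fold (ec : List String) (keywords : List String)
    (h : PySem.Set Int) (rem : List Int) (x : Int) :
    x ∈ (keywords.foldl (fun st keyword =>
        st.2.foldl (fun hs i =>
          if PySem.Str.isIn keyword (PySem.List.pyGetD ec i "") then
            (PySem.Set.add hs.1 i, hs.2)
          else (hs.1, hs.2 ++ [i])) (st.1, ([] : List Int))) (h, rem)).1 ↔
      x ∈ h ∨ (x ∈ rem ∧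
        (keywords.any (fun kw => PySem.Str.isIn kw (PySem.List.pyGetD ec x ""))) = true) := by
  induction keywords generalizing h rem with
  | nil => simp
  | cons kw t ih =>
    simp only [List.foldl_cons]
    rw [inner_fold_eq, ih]
    simp only [PySem.Set.mem_update, List.mem_filter, List.any_cons, Bool.or_eq_true]
    cases hb : PySem.Str.isIn kw (PySem.List.pyGetD ec x "") with
    | true => simp; tauto
    | false => simp; tauto

-- the final hit set has no duplicates
theorem nodup_outer_fold (ec : List String) (keywords : List String)
    (h : PySem.Set Int) (rem : List Int) (hh : h.Nodup) :
    ((keywords.foldl (fun st keyword =>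
        st.2.foldl (fun hs i =>
          if PySem.Str.isIn keyword (PySem.List.pyGetD ec i "") then
            (PySem.Set.add hs.1 i, hs.2)
          else (hs.1, hs.2 ++ [i])) (st.1, ([] : List Int))) (h, rem)).1).Nodup := by
  induction keywords generalizing h rem with
  | nil => exact hh
  | cons kw t ih =>
    simp only [List.foldl_cons]
    rw [inner_fold_eq]
    exact ih _ _ (PySem.Set.nodup_update _ _ hh)

theorem find_errors_with_keywords_py_spec : Claim_equal_find_errors_with_keywords_py := by
  intro ec keywords _
  unfold Spec_find_errors_with_keywords_py find_errors_with_keywords_py find_errors_with_keywords_py_alt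
  rw [PySem.List.foldl_append_if]
  simp only [List.nil_append]
  set P : Int → Bool := fun i => keywords.any (fun kw => PySem.Str.isIn kw (PySem.List.pyGetD ec i "")) with hP
  set T : List Int := (PySem.List.pyRange 0 (PySem.List.len ec) 1).filter P with hT
  set hit : PySem.Set Int := (keywords.foldl (fun st keyword =>
        st.2.foldl (fun hs i =>
          if PySem.Str.isIn keyword (PySem.List.pyGetD ec i "") then
            (PySem.Set.add hs.1 i, hs.2)
          else (hs.1, hs.2 ++ [i])) (st.1, ([] : List Int)))
      (PySem.Set.empty, PySem.List.pyRange 0 (PySem.List.len ec) 1)).1 with hhit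
  have hpair : T.Pairwise (· < ·) := (PySem.List.pairwise_lt_pyRange_one 0 _).filter P
  have hperm : T.Perm hit := by
    rw [List.perm_ext_iff_of_nodup (hpair.imp (fun h => ne_of_lt h))
      (nodup_outer_fold ec keywords PySem.Set.empty _ (by simp [PySem.Set.empty]))]
    intro x
    rw [mem_outer_fold, hT, List.mem_filter]
    simp [PySem.Set.empty, hP]
  have hsorted : PySem.List.sorted hit (fun i => i) false = T := by
    exact PySem.List.sorted_eq_of_perm_of_pairwise_lt _ _ _ hperm (by simpa using hpair)
  rw [hsorted, hT]
  -- turn the index computation into the chunk computation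
  have hmap : PySem.List.len ec = (ec.length : Int) := by simp
  rw [hmap]
  have hgmap := PySem.List.map_pyGetD_pyRange_zero (xs := ec) (d := "")
  rw [hmap] at hgmap
  refine Eq.symm ?_
  calc ((PySem.List.pyRange 0 (ec.length : Int) 1).filter P).map
          (fun i => PySem.Str.strip (PySem.List.pyGetD ec i ""))
      = (((PySem.List.pyRange 0 (ec.length : Int) 1).map
            (fun i => PySem.List.pyGetD ec i "")).filter
            (fun c => keywords.any (fun kw => PySem.Str.isIn kw c))).map PySem.Str.strip := by
        rw [List.filter_map, List.map_map]
        rfl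
    _ = (ec.filter (fun c => keywords.any (fun kw => PySem.Str.isIn kw c))).map
          PySem.Str.strip := by rw [hgmap]
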